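-- pv_equiv track=rewrite | github.com/dendritic-network/adjacency-matrix | dnm_adjacency-main/dnm_connectivity_app.py | get_closest_nodes_centered
-- ===== SOURCE A (Python) =====
-- def get_closest_nodes_centered(i, N, count):
--     """
--     Returns a list of 'count' indices from a layer of size N,
--     ordered as: i, i-1, i+1, i-2, i+2, … (with modulo wrapping)
--     """
--     indices = [i]
--     d = 1
--     while len(indices) < count:
--         indices.append((i - d) % N)
--         if len(indices) < count:
--             indices.append((i + d) % N)
--         d += 1
--     return indices[:count]
-- ===== SOURCE B (Python) =====
-- def get_closest_nodes_centered(i, N, count):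
--     """
--     Returns a list of 'count' indices from a layer of size N,
--     ordered as: i, i-1, i+1, i-2, i+2, ... (with modulo wrapping)
--     """
--     if count <= 0:
--         return []
--     half = count // 2
--     left = [(i - d) % N for d in range(1, half + 1)]
--     right = [(i + d) % N for d in range(1, count - half)]
--     merged = [x for pair in zip(left, right) for x in pair]
--     merged += left[len(right):]
--     return [i] + merged
-- ===== Notes on version B (the rewrite author's own statement) =====
-- stated objective: alternative
-- what changed: Builds the left neighbours and right neighbours as two separate staged lists, then interleaves them with zip+flatten plus the leftover left element, instead of A's single while-loop that alternates appends with a mid-loop length check.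
import Mathlib
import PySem

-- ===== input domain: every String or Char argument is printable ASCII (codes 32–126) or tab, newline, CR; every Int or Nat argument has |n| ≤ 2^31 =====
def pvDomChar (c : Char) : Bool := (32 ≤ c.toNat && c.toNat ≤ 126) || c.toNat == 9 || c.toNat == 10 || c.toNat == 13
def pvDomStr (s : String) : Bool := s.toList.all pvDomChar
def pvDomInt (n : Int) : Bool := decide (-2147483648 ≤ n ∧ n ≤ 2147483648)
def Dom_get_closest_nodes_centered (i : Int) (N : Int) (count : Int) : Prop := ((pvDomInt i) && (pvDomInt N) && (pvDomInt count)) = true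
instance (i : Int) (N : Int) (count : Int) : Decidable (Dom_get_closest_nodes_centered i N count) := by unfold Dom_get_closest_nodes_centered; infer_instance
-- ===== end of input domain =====

-- B builds the left and right neighbour lists as two separate staged passes and interleaves
-- them with zip, instead of A's while-loop of alternating appends (alternative decomposition, same cost).

-- ===== PORT A =====
-- the while-loop: append (i-d)%N, re-check length, maybe append (i+d)%N, d += 1
def pvALoop (i N count : Int) (acc : List Int) (d : Int) : List Int :=
  if h : (acc.length : Int) < count then
    let acc1 := acc ++ [PySem.Int.mod (i - d) N]
    if (acc1.length : Int) < count then
      pvALoop i N count (acc1 ++ [PySem.Int.mod (i + d) N]) (d + 1)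
    else
      pvALoop i N count acc1 (d + 1)
  else acc
termination_by (count - acc.length).toNat
decreasing_by
  · simp; omega
  · simp; omega

def get_closest_nodes_centered (i : Int) (N : Int) (count : Int) : List Int :=
  PySem.List.slice (pvALoop i N count [i] 1) none (some count)

-- ===== PORT B =====
-- merged = [x for pair in zip(left, right) for x in pair] + left[len(right):]
def pvMerge (left right : List Int) : List Int :=
  ((left.zip right).flatMap fun p => [p.1, p.2]) ++ left.drop right.length

def get_closest_nodes_centered_alt (i : Int) (N : Int) (count : Int) : List Int :=
  if count ≤ 0 then []
  else
    let half := PySem.Int.floordiv count 2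
    let left := (PySem.List.pyRange 1 (half + 1) 1).map (fun d => PySem.Int.mod (i - d) N)
    let right := (PySem.List.pyRange 1 (count - half) 1).map (fun d => PySem.Int.mod (i + d) N)
    i :: pvMerge left right

-- ===== PRECONDITION & SPEC =====
-- Pre_ excludes exactly the inputs where Python A raises ZeroDivisionError: N = 0 with count ≥ 2
def Pre_get_closest_nodes_centered (i : Int) (N : Int) (count : Int) : Prop := 2 ≤ count → N ≠ 0
instance (i : Int) (N : Int) (count : Int) : Decidable (Pre_get_closest_nodes_centered i N count) := by unfold Pre_get_closest_nodes_centered; infer_instance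
def pvWitness_get_closest_nodes_centered : Int × Int × Int := (3, 10, 7)

def Spec_get_closest_nodes_centered (i : Int) (N : Int) (count : Int) (out : List Int) : Prop := out = get_closest_nodes_centered_alt i N count
instance (i : Int) (N : Int) (count : Int) (out : List Int) : Decidable (Spec_get_closest_nodes_centered i N count out) := by unfold Spec_get_closest_nodes_centered; infer_instance

-- ===== CLAIM (what is proved, stated in full; the proofs are below) =====
def Claim_equal_get_closest_nodes_centered : Prop := ∀ (i : Int) (N : Int) (count : Int), Dom_get_closest_nodes_centered i N count → Pre_get_closest_nodes_centered i N count → Spec_get_closest_nodes_centered i N count (get_closest_nodes_centered i N count)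

-- ===== LEMMAS AND PROOFS =====

-- tail position value: position k after the raw center
def pvTailVal (i N k : Int) : Int :=
  if PySem.Int.mod k 2 = 0 then PySem.Int.mod (i - (PySem.Int.floordiv k 2 + 1)) N
  else PySem.Int.mod (i + (PySem.Int.floordiv k 2 + 1)) N

lemma pvALoop_stop (i N count : Int) (acc : List Int) (d : Int)
    (h : ¬ ((acc.length : Int) < count)) : pvALoop i N count acc d = acc := by
  rw [pvALoop]; simp [h]

lemma pvTailVal_even (i N d : Int) :
    pvTailVal i N (2*d - 2) = PySem.Int.mod (i - d) N := by
  unfold pvTailVal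
  rw [PySem.Int.mod_eq_emod_of_pos (by omega), PySem.Int.floordiv_eq_ediv_of_pos (by omega)]
  have h1 : (2*d - 2) % 2 = 0 := by omega
  have h2 : (2*d - 2) / 2 = d - 1 := by omega
  rw [h1, h2]; simp

lemma pvTailVal_odd (i N d : Int) :
    pvTailVal i N (2*d - 1) = PySem.Int.mod (i + d) N := by
  unfold pvTailVal
  rw [PySem.Int.mod_eq_emod_of_pos (by omega), PySem.Int.floordiv_eq_ediv_of_pos (by omega)]
  have h1 : (2*d - 1) % 2 = 1 := by omega
  have h2 : (2*d - 1) / 2 = d - 1 := by omega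
  rw [h1, h2]; simp

-- loop invariant for A: entering an iteration with d ≥ 1 and acc = center + tail positions 0..2d-3
lemma pvALoop_inv (i N count : Int) : ∀ (fuel : Nat) (d : Int), 1 ≤ d →
    fuel = (count - (2*d - 1)).toNat →
    pvALoop i N count (i :: (PySem.List.pyRange 0 (2*d - 2) 1).map (pvTailVal i N)) d =
      i :: (PySem.List.pyRange 0 (max (count - 1) (2*d - 2)) 1).map (pvTailVal i N) := by
  intro fuel
  induction fuel using Nat.strong_induction_on with
  | _ fuel ih =>
    intro d hd hfuel
    have hlen : ((i :: (PySem.List.pyRange 0 (2*d - 2) 1).map (pvTailVal i N)).length : Int)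
        = 2*d - 1 := by
      simp [PySem.List.length_pyRange_one]; omega
    by_cases hlt : (2*d - 1 : Int) < count
    · rw [pvALoop]
      rw [dif_pos (by rw [hlen]; exact hlt)]
      have hext1 : (i :: (PySem.List.pyRange 0 (2*d - 2) 1).map (pvTailVal i N)) ++
          [PySem.Int.mod (i - d) N]
          = i :: (PySem.List.pyRange 0 (2*d - 1) 1).map (pvTailVal i N) := by
        have : (2*d - 1 : Int) = (2*d - 2) + 1 := by ring
        rw [this, PySem.List.pyRange_one_succ_right (by omega)]
        simp [pvTailVal_even i N d]
      rw [hext1]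
      have hlen1 : ((i :: (PySem.List.pyRange 0 (2*d - 1) 1).map (pvTailVal i N)).length : Int)
          = 2*d := by
        simp [PySem.List.length_pyRange_one]; omega
      by_cases hlt2 : (2*d : Int) < count
      · rw [if_pos (by rw [hlen1]; exact hlt2)]
        have hext2 : (i :: (PySem.List.pyRange 0 (2*d - 1) 1).map (pvTailVal i N)) ++
            [PySem.Int.mod (i + d) N]
            = i :: (PySem.List.pyRange 0 (2*(d+1) - 2) 1).map (pvTailVal i N) := by
          have : (2*(d+1) - 2 : Int) = (2*d - 1) + 1 := by ring
          rw [this, PySem.List.pyRange_one_succ_right (by omega)]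
          simp [pvTailVal_odd i N d]
        rw [hext2]
        rw [ih (count - (2*(d+1) - 1)).toNat (by omega) (d+1) (by omega) rfl]
        have : max (count - 1) (2*(d+1) - 2) = max (count - 1) (2*d - 2) := by omega
        rw [this]
      · rw [if_neg (by rw [hlen1]; exact hlt2)]
        rw [pvALoop_stop _ _ _ _ _ (by rw [hlen1]; omega)]
        have : max (count - 1) (2*d - 2) = 2*d - 1 := by omega
        rw [this]
    · rw [pvALoop_stop _ _ _ _ _ (by rw [hlen]; omega)]
      have : max (count - 1) (2*d - 2) = 2*d - 2 := by omega
      rw [this]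

lemma pvMerge_nil_right (l : List Int) : pvMerge l [] = l := by
  simp [pvMerge]

lemma pvMerge_cons (x y : Int) (ls rs : List Int) :
    pvMerge (x :: ls) (y :: rs) = x :: y :: pvMerge ls rs := by
  simp [pvMerge]

-- B's zip-interleave of the two staged ranges equals the per-position tail formula
lemma pvMerge_ranges (i N : Int) : ∀ (b a : Nat) (s : Int), 1 ≤ s → (a = b ∨ a = b + 1) →
    pvMerge ((PySem.List.pyRange s (s + a) 1).map (fun d => PySem.Int.mod (i - d) N))
            ((PySem.List.pyRange s (s + b) 1).map (fun d => PySem.Int.mod (i + d) N))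
    = (PySem.List.pyRange (2*s - 2) (2*s - 2 + a + b) 1).map (pvTailVal i N) := by
  intro b
  induction b with
  | zero =>
    intro a s hs hab
    rcases hab with h0 | h1
    · subst h0
      simp [PySem.List.pyRange_one_eq_nil, pvMerge_nil_right]
    · subst h1
      have hL : PySem.List.pyRange s (s + (0 + 1 : Nat)) 1 = [s] := by
        push_cast
        exact PySem.List.pyRange_one_singleton s
      have hR : PySem.List.pyRange s (s + (0 : Nat)) 1 = [] := by
        push_cast
        exact PySem.List.pyRange_one_eq_nil (by omega)
      have hT : PySem.List.pyRange (2*s - 2) (2*s - 2 + (0 + 1 : Nat) + (0 : Nat)) 1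
          = [2*s - 2] := by
        push_cast
        have : (2*s - 2 + 1 + 0 : Int) = (2*s - 2) + 1 := by ring
        rw [this]
        exact PySem.List.pyRange_one_singleton _
      rw [hL, hR, hT]
      simp [pvMerge_nil_right, pvTailVal_even i N s]
  | succ b ih =>
    intro a s hs hab
    have ha1 : 1 ≤ a := by omega
    have hL : PySem.List.pyRange s (s + (a : Int)) 1
        = s :: PySem.List.pyRange (s + 1) (s + (a : Int)) 1 :=
      PySem.List.pyRange_one_cons (by omega)
    have hR : PySem.List.pyRange s (s + ((b + 1 : Nat) : Int)) 1
        = s :: PySem.List.pyRange (s + 1) (s + ((b + 1 : Nat) : Int)) 1 :=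
      PySem.List.pyRange_one_cons (by push_cast; omega)
    rw [hL, hR]
    simp only [List.map_cons]
    rw [pvMerge_cons]
    have hLrest : (s + (a : Int)) = (s + 1) + ((a - 1 : Nat) : Int) := by push_cast; omega
    have hRrest : (s + ((b + 1 : Nat) : Int)) = (s + 1) + ((b : Nat) : Int) := by push_cast; omega
    rw [hLrest, hRrest]
    rw [ih (a - 1) (s + 1) (by omega) (by omega)]
    have hT : PySem.List.pyRange (2*s - 2) (2*s - 2 + (a : Int) + ((b + 1 : Nat) : Int)) 1
        = (2*s - 2) :: (2*s - 1) ::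
          PySem.List.pyRange (2*(s+1) - 2) (2*(s+1) - 2 + ((a - 1 : Nat) : Int) + (b : Int)) 1 := by
      rw [PySem.List.pyRange_one_cons (by push_cast; omega)]
      have h1 : (2*s - 2 + 1 : Int) = 2*s - 1 := by ring
      rw [h1, PySem.List.pyRange_one_cons (by push_cast; omega)]
      have h2 : (2*s - 1 + 1 : Int) = 2*(s+1) - 2 := by ring
      have h3 : (2*s - 2 + (a : Int) + ((b + 1 : Nat) : Int))
          = 2*(s+1) - 2 + ((a - 1 : Nat) : Int) + (b : Int) := by push_cast; omega
      rw [h2, h3]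
    rw [hT]
    simp [pvTailVal_even i N s, pvTailVal_odd i N s]

-- B unfolded: center followed by the per-position tail formula
lemma alt_eq_tail (i N count : Int) (hc : 1 ≤ count) :
    get_closest_nodes_centered_alt i N count =
      i :: (PySem.List.pyRange 0 (count - 1) 1).map (pvTailVal i N) := by
  unfold get_closest_nodes_centered_alt
  rw [if_neg (by omega)]
  have hfd : PySem.Int.floordiv count 2 = count / 2 :=
    PySem.Int.floordiv_eq_ediv_of_pos (by omega)
  simp only [hfd]
  have hhalf0 : 0 ≤ count / 2 := by omega
  have hhalf1 : count / 2 ≤ count - 1 := by omega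
  set a : Nat := (count / 2).toNat with ha
  set b : Nat := (count - 1 - count / 2).toNat with hb
  have hL : (count / 2 + 1 : Int) = 1 + (a : Int) := by omega
  have hR : (count - count / 2 : Int) = 1 + (b : Int) := by omega
  rw [hL, hR, pvMerge_ranges i N b a 1 (by omega) (by omega)]
  have hT : (2*(1:Int) - 2 + (a : Int) + (b : Int)) = count - 1 := by omega
  rw [hT]
  norm_num

-- ===== VERDICT (by name: the statement is the Claim_ definition above) =====
theorem get_closest_nodes_centered_spec : Claim_equal_get_closest_nodes_centered := by
  intro i N count _ _
  unfold Spec_get_closest_nodes_centered get_closest_nodes_centered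
  by_cases hc : count ≤ 0
  · rw [pvALoop_stop _ _ _ _ _ (by simp; omega)]
    unfold get_closest_nodes_centered_alt
    rw [if_pos hc]
    rcases eq_or_lt_of_le hc with h0 | hneg
    · subst h0; rw [PySem.List.slice_to _ (by omega)]; simp
    · have hk : count = -(((-count).toNat : Nat) : Int) := by omega
      rw [hk, PySem.List.slice_to_neg_natCast _ _ (by omega)]
      simp
      omega
  · have h1 : pvALoop i N count [i] 1 =
        i :: (PySem.List.pyRange 0 (max (count - 1) 0) 1).map (pvTailVal i N) := by
      have := pvALoop_inv i N count (count - 1).toNat 1 (by omega) (by norm_num)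
      simpa using this
    rw [h1]
    have hmax : max (count - 1) (0:Int) = count - 1 := by omega
    rw [hmax, PySem.List.slice_to _ (by omega)]
    rw [alt_eq_tail i N count (by omega)]
    apply List.take_of_length_le
    simp [PySem.List.length_pyRange_one]; omega
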